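-- pv_equiv track=rewrite | github.com/tjs145/advent-of-code-2022 | day-23/main.py | count_empty_ground_tiles
-- ===== SOURCE A (Python) =====
-- def count_empty_ground_tiles(elf_positions):
--     min_x = elf_positions[0][0]
--     max_x = elf_positions[0][0]
--     min_y = elf_positions[0][1]
--     max_y = elf_positions[0][1]
--     for p in elf_positions:
--         if p[0] > max_x:
--             max_x = p[0]
--         elif p[0] < min_x:
--             min_x = p[0]
--
--         if p[1] > max_y:
--             max_y = p[1]
--         elif p[1] < min_y:
--             min_y = p[1]
--
--     return ((max_x - min_x + 1) * (max_y - min_y + 1)) - len(elf_positions)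
-- ===== SOURCE B (Python) =====
-- def count_empty_ground_tiles(elf_positions):
--     xs = sorted(p[0] for p in elf_positions)
--     ys = sorted(p[1] for p in elf_positions)
--     return (xs[-1] - xs[0] + 1) * (ys[-1] - ys[0] + 1) - len(elf_positions)
-- ===== Notes on version B (the rewrite author's own statement) =====
-- stated objective: alternative
-- what changed: Replaced the fused four-extrema tracking loop by sorting each projected coordinate list and reading the bounding box off the sorted endpoints (first/last element), trading an O(n) scan for an O(n log n) sort-then-index strategy.
import Mathlib
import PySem

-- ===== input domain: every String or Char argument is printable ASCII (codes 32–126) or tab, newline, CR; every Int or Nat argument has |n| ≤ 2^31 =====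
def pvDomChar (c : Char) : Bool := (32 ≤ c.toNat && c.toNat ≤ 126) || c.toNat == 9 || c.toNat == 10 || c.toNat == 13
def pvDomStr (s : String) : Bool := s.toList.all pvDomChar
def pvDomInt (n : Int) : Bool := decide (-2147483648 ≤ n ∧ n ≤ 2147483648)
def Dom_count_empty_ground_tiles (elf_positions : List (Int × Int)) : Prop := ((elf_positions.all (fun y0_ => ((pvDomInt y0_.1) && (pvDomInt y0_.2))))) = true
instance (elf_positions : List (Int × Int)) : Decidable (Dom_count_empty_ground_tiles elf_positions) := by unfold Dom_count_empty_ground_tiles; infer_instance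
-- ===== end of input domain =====

-- B replaces A's fused four-extrema tracking loop by sorting each projected coordinate list and reading the bounding box off the sorted endpoints (alternative algorithm, same result).


-- ===== PORT A =====
-- A's loop body: the if/elif updates of (min_x, max_x, min_y, max_y), transliterated
def pvStep (st : Int × Int × Int × Int) (p : Int × Int) : Int × Int × Int × Int :=
  let mnx := st.1; let mxx := st.2.1; let mny := st.2.2.1; let mxy := st.2.2.2
  let xs := if p.1 > mxx then (mnx, p.1) else if p.1 < mnx then (p.1, mxx) else (mnx, mxx)
  let ys := if p.2 > mxy then (mny, p.2) else if p.2 < mny then (p.2, mxy) else (mny, mxy)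
  (xs.1, xs.2, ys.1, ys.2)

-- literal port of A: one fold carrying (min_x, max_x, min_y, max_y), seeded from elf_positions[0]
def count_empty_ground_tiles (elf_positions : List (Int × Int)) : Int :=
  match elf_positions with
  | [] => 0  -- elf_positions[0] raises IndexError in Python: excluded by Pre_
  | p0 :: _ =>
    let s := elf_positions.foldl pvStep (p0.1, p0.1, p0.2, p0.2)
    ((s.2.1 - s.1 + 1) * (s.2.2.2 - s.2.2.1 + 1)) - elf_positions.length

-- ===== PORT B =====
-- literal port of B: sort each projected coordinate list, read off xs[-1], xs[0], ys[-1], ys[0]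
def count_empty_ground_tiles_alt (elf_positions : List (Int × Int)) : Int :=
  let xs := PySem.List.sorted (elf_positions.map Prod.fst) (fun y => y) false
  let ys := PySem.List.sorted (elf_positions.map Prod.snd) (fun y => y) false
  match PySem.List.pyGet? xs (-1), PySem.List.pyGet? xs 0,
        PySem.List.pyGet? ys (-1), PySem.List.pyGet? ys 0 with
  | some mxx, some mnx, some mxy, some mny =>
      (mxx - mnx + 1) * (mxy - mny + 1) - elf_positions.length
  | _, _, _, _ => 0  -- xs[-1] on the empty list raises IndexError: excluded by Pre_

-- ===== PRECONDITION & SPEC =====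
-- Pre_ excludes exactly the empty list, on which both A and B raise IndexError.
def Pre_count_empty_ground_tiles (elf_positions : List (Int × Int)) : Prop := elf_positions ≠ []
instance (elf_positions : List (Int × Int)) : Decidable (Pre_count_empty_ground_tiles elf_positions) := by unfold Pre_count_empty_ground_tiles; infer_instance
def pvWitness_count_empty_ground_tiles : (List (Int × Int)) := [(0, 1), (2, -3)]

def Spec_count_empty_ground_tiles (elf_positions : List (Int × Int)) (out : Int) : Prop := out = count_empty_ground_tiles_alt elf_positions
instance (elf_positions : List (Int × Int)) (out : Int) : Decidable (Spec_count_empty_ground_tiles elf_positions out) := by unfold Spec_count_empty_ground_tiles; infer_instance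

-- ===== CLAIM (what is proved, stated in full; the proofs are below) =====
def Claim_equal_count_empty_ground_tiles : Prop := ∀ (elf_positions : List (Int × Int)), Dom_count_empty_ground_tiles elf_positions → Pre_count_empty_ground_tiles elf_positions → Spec_count_empty_ground_tiles elf_positions (count_empty_ground_tiles elf_positions)

-- ===== LEMMAS AND PROOFS =====

theorem pvStep_eq (mnx mxx mny mxy px py : Int) (hx : mnx ≤ mxx) (hy : mny ≤ mxy) :
    pvStep (mnx, mxx, mny, mxy) (px, py) = (min mnx px, max mxx px, min mny py, max mxy py) := by
  simp only [pvStep]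
  split_ifs <;> simp only [Prod.mk.injEq] <;> refine ⟨by omega, by omega, by omega, by omega⟩

-- A's elif-loop computes the four running extrema, provided min ≤ max in each coordinate.
theorem pvStep_foldl (l : List (Int × Int)) :
    ∀ (mnx mxx mny mxy : Int), mnx ≤ mxx → mny ≤ mxy →
    l.foldl pvStep (mnx, mxx, mny, mxy) =
      (l.foldl (fun a p => min a p.1) mnx,
       l.foldl (fun a p => max a p.1) mxx,
       l.foldl (fun a p => min a p.2) mny,
       l.foldl (fun a p => max a p.2) mxy) := by
  induction l with
  | nil => intro _ _ _ _ _ _; rfl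
  | cons p t ih =>
    intro mnx mxx mny mxy hx hy
    simp only [List.foldl_cons]
    rw [pvStep_eq mnx mxx mny mxy p.1 p.2 hx hy,
        ih (min mnx p.1) (max mxx p.1) (min mny p.2) (max mxy p.2) (by omega) (by omega)]

theorem foldl_min_le (X : List Int) (i : Int) :
    X.foldl min i ≤ i ∧ ∀ x ∈ X, X.foldl min i ≤ x := by
  induction X generalizing i with
  | nil => exact ⟨le_rfl, by simp⟩
  | cons a t ih =>
    obtain ⟨h1, h2⟩ := ih (min i a)
    refine ⟨le_trans h1 (min_le_left _ _), ?_⟩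
    intro x hx
    rcases List.mem_cons.mp hx with rfl | hx
    · exact le_trans h1 (min_le_right _ _)
    · exact h2 x hx

theorem foldl_min_mem (X : List Int) (i : Int) :
    X.foldl min i = i ∨ X.foldl min i ∈ X := by
  induction X generalizing i with
  | nil => exact Or.inl rfl
  | cons a t ih =>
    rcases ih (min i a) with h | h
    · rcases min_cases i a with ⟨he, _⟩ | ⟨he, _⟩
      · exact Or.inl (by simpa [List.foldl_cons, he] using h)
      · refine Or.inr ?_
        rw [List.foldl_cons, h, he]
        exact List.mem_cons_self
    · exact Or.inr (List.mem_cons_of_mem a h)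

theorem foldl_max_ge (X : List Int) (i : Int) :
    i ≤ X.foldl max i ∧ ∀ x ∈ X, x ≤ X.foldl max i := by
  induction X generalizing i with
  | nil => exact ⟨le_rfl, by simp⟩
  | cons a t ih =>
    obtain ⟨h1, h2⟩ := ih (max i a)
    refine ⟨le_trans (le_max_left _ _) h1, ?_⟩
    intro x hx
    rcases List.mem_cons.mp hx with rfl | hx
    · exact le_trans (le_max_right _ _) h1
    · exact h2 x hx

theorem foldl_max_mem (X : List Int) (i : Int) :
    X.foldl max i = i ∨ X.foldl max i ∈ X := by
  induction X generalizing i with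
  | nil => exact Or.inl rfl
  | cons a t ih =>
    rcases ih (max i a) with h | h
    · rcases max_cases i a with ⟨he, _⟩ | ⟨he, _⟩
      · exact Or.inl (by simpa [List.foldl_cons, he] using h)
      · refine Or.inr ?_
        rw [List.foldl_cons, h, he]
        exact List.mem_cons_self
    · exact Or.inr (List.mem_cons_of_mem a h)

-- If m is a member and a lower bound of X, and the seed i is a member of X, the min-fold equals m.
theorem foldl_min_eq (X : List Int) (i : Int) (hi : i ∈ X) (m : Int)
    (hm : m ∈ X) (hlb : ∀ y ∈ X, m ≤ y) : X.foldl min i = m := by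
  refine le_antisymm ((foldl_min_le X i).2 m hm) ?_
  rcases foldl_min_mem X i with h | h
  · rw [h]; exact hlb i hi
  · exact hlb _ h

theorem foldl_max_eq (X : List Int) (i : Int) (hi : i ∈ X) (m : Int)
    (hm : m ∈ X) (hub : ∀ y ∈ X, y ≤ m) : X.foldl max i = m := by
  refine le_antisymm ?_ ((foldl_max_ge X i).2 m hm)
  rcases foldl_max_mem X i with h | h
  · rw [h]; exact hub i hi
  · exact hub _ h

-- In a ≤-pairwise (ascending) list, the last element is an upper bound.
theorem pairwise_le_getLast (s : List Int) (h : s.Pairwise (· ≤ ·)) (hne : s ≠ []) :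
    ∀ y ∈ s, y ≤ s.getLast hne := by
  induction s with
  | nil => cases hne rfl
  | cons a t ih =>
    intro y hy
    cases t with
    | nil => simp_all
    | cons b u =>
      have hlast : (a :: b :: u).getLast hne = (b :: u).getLast (by simp) :=
        List.getLast_cons (by simp)
      rw [hlast]
      rcases List.mem_cons.mp hy with rfl | hy
      · exact le_trans ((List.pairwise_cons.mp h).1 _ (List.getLast_mem _))
          (le_refl _)
      · exact ih (List.pairwise_cons.mp h).2 (by simp) y hy

theorem count_empty_ground_tiles_spec : Claim_equal_count_empty_ground_tiles := by
  intro l _ hpre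
  unfold Spec_count_empty_ground_tiles
  match l, hpre with
  | p0 :: t, _ =>
    show count_empty_ground_tiles (p0 :: t) = count_empty_ground_tiles_alt (p0 :: t)
    unfold count_empty_ground_tiles count_empty_ground_tiles_alt
    simp only []
    rw [pvStep_foldl (p0 :: t) p0.1 p0.1 p0.2 p0.2 le_rfl le_rfl]
    -- name the two sorted coordinate lists
    set X : List Int := (p0 :: t).map Prod.fst with hX
    set Y : List Int := (p0 :: t).map Prod.snd with hY
    have hXne : X ≠ [] := by simp [hX]
    have hYne : Y ≠ [] := by simp [hY]
    set sX := PySem.List.sorted X (fun y => y) false with hsX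
    set sY := PySem.List.sorted Y (fun y => y) false with hsY
    have hsXne : sX ≠ [] := by
      rw [hsX]; simp only [ne_eq, PySem.List.sorted_eq_nil_iff]; exact hXne
    have hsYne : sY ≠ [] := by
      rw [hsY]; simp only [ne_eq, PySem.List.sorted_eq_nil_iff]; exact hYne
    -- endpoint accesses
    obtain ⟨mx, tx, hx⟩ := List.exists_cons_of_ne_nil hsXne
    obtain ⟨my, ty, hy⟩ := List.exists_cons_of_ne_nil hsYne
    have hget0X : PySem.List.pyGet? sX 0 = some mx := by
      rw [hx]; exact PySem.List.pyGet?_zero_cons mx tx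
    have hget0Y : PySem.List.pyGet? sY 0 = some my := by
      rw [hy]; exact PySem.List.pyGet?_zero_cons my ty
    have hgetLX : PySem.List.pyGet? sX (-1) = some (sX.getLast hsXne) := by
      rw [PySem.List.pyGet?_neg_one, List.getLast?_eq_some_getLast hsXne]
    have hgetLY : PySem.List.pyGet? sY (-1) = some (sY.getLast hsYne) := by
      rw [PySem.List.pyGet?_neg_one, List.getLast?_eq_some_getLast hsYne]
    rw [hget0X, hget0Y, hgetLX, hgetLY]
    -- characterize the fold results
    have hmemX : p0.1 ∈ X := by simp [hX]
    have hmemY : p0.2 ∈ Y := by simp [hY]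
    have hpwX : sX.Pairwise (· ≤ ·) := by
      simpa using PySem.List.sorted_pairwise (xs := X) (key := fun y => y)
    have hpwY : sY.Pairwise (· ≤ ·) := by
      simpa using PySem.List.sorted_pairwise (xs := Y) (key := fun y => y)
    have hminX : ((p0 :: t).foldl (fun a p => min a p.1) p0.1) = mx := by
      rw [show ((p0 :: t).foldl (fun a p => min a p.1) p0.1) = X.foldl min p0.1 by
            rw [hX, List.foldl_map]]
      refine foldl_min_eq X p0.1 hmemX mx ?_ ?_
      · exact (PySem.List.mem_sorted X (fun y => y) false mx).mp (by rw [← hsX]; exact hx ▸ List.mem_cons_self)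
      · intro y hy'
        have := PySem.List.key_head_sorted_le (xs := X) (key := fun y => y) hx y hy'
        simpa using this
    have hminY : ((p0 :: t).foldl (fun a p => min a p.2) p0.2) = my := by
      rw [show ((p0 :: t).foldl (fun a p => min a p.2) p0.2) = Y.foldl min p0.2 by
            rw [hY, List.foldl_map]]
      refine foldl_min_eq Y p0.2 hmemY my ?_ ?_
      · exact (PySem.List.mem_sorted Y (fun y => y) false my).mp (by rw [← hsY]; exact hy ▸ List.mem_cons_self)
      · intro y hy'
        have := PySem.List.key_head_sorted_le (xs := Y) (key := fun y => y) hy y hy'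
        simpa using this
    have hmaxX : ((p0 :: t).foldl (fun a p => max a p.1) p0.1) = sX.getLast hsXne := by
      rw [show ((p0 :: t).foldl (fun a p => max a p.1) p0.1) = X.foldl max p0.1 by
            rw [hX, List.foldl_map]]
      refine foldl_max_eq X p0.1 hmemX _ ?_ ?_
      · exact (PySem.List.mem_sorted X (fun y => y) false _).mp (List.getLast_mem hsXne)
      · intro y hy'
        exact pairwise_le_getLast sX hpwX hsXne y ((PySem.List.mem_sorted X (fun y => y) false y).mpr hy')
    have hmaxY : ((p0 :: t).foldl (fun a p => max a p.2) p0.2) = sY.getLast hsYne := by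
      rw [show ((p0 :: t).foldl (fun a p => max a p.2) p0.2) = Y.foldl max p0.2 by
            rw [hY, List.foldl_map]]
      refine foldl_max_eq Y p0.2 hmemY _ ?_ ?_
      · exact (PySem.List.mem_sorted Y (fun y => y) false _).mp (List.getLast_mem hsYne)
      · intro y hy'
        exact pairwise_le_getLast sY hpwY hsYne y ((PySem.List.mem_sorted Y (fun y => y) false y).mpr hy')
    simp only [hminX, hminY, hmaxX, hmaxY]
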